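-- pv_equiv track=rewrite | github.com/nightkid101/YqGq-wl | utility/utility_requests.py | connect_urls
-- ===== SOURCE A (Python) =====
-- def connect_urls(forward, backward):
--     if backward.startswith('./'):
--         return forward + backward.replace('./', '')
--     elif backward.startswith('../'):
--         # 去掉一层
--         if forward.endswith('/'):
--             forward = forward[:-1]
--         forward = forward[:forward.rfind('/')]
--         backward = backward[3:]
--         return connect_urls(forward, backward)
--     else:
--         return forward + '/' + backward
-- ===== SOURCE B (Python) =====
-- def connect_urls(forward, backward):
--     # Phase 1: count the leading '../' levels while consuming them from backward.
--     levels = 0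
--     while backward.startswith('../'):
--         backward = backward[3:]
--         levels += 1
--     # Phase 2: trim that many path components off forward.
--     for _ in range(levels):
--         if forward.endswith('/'):
--             forward = forward[:-1]
--         forward = forward[:forward.rfind('/')]
--     # Final join (keeps the all-occurrence './' removal of the original).
--     if backward.startswith('./'):
--         return forward + backward.replace('./', '')
--     return forward + '/' + backward
-- ===== Notes on version B (the rewrite author's own statement) =====
-- stated objective: alternative
-- what changed: Replaces A's tail recursion by a two-phase iterative version: first count and consume all leading '../' levels from backward, then trim forward that many times, then do one final join.
import Mathlib
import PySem

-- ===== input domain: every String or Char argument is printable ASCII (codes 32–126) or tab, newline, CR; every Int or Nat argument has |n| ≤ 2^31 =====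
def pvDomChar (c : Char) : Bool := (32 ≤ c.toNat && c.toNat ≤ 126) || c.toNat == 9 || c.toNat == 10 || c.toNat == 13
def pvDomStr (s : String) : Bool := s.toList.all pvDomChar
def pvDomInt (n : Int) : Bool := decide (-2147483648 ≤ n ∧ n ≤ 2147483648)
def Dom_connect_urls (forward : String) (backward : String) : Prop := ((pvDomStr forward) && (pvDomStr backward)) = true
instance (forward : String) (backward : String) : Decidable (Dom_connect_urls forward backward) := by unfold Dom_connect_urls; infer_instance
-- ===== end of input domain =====

-- B replaces A's tail recursion by a two-phase loop (count '../' levels, then trim);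
-- equivalence of the RETURN values on all inputs (A only rebinds its local parameters).

-- ===== PORT A =====
-- literal transliteration of A's recursion, on the List Char side
def connect_urls_core (forward : List Char) (backward : List Char) : List Char :=
  if PySem.Chars.startswith backward ['.', '/'] then
    forward ++ PySem.Chars.replace backward ['.', '/'] []
  else if h : PySem.Chars.startswith backward ['.', '.', '/'] then
    let f1 := if PySem.Chars.endswith forward ['/'] then
                PySem.Chars.slice forward none (some (-1)) else forward
    let f2 := PySem.Chars.slice f1 none (some (PySem.Chars.rfind f1 ['/']))
    connect_urls_core f2 (PySem.Chars.slice backward (some 3) none)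
  else
    forward ++ '/' :: backward
termination_by backward.length
decreasing_by
  have h3 : 3 ≤ backward.length := by
    rw [PySem.Chars.startswith_iff] at h
    simpa using h.length_le
  simp only [PySem.Chars.slice_eq_listSlice]
  rw [show ((3 : Int)) = ((3 : Nat) : Int) by norm_num, PySem.List.slice_from_natCast]
  simp; omega

def connect_urls (forward : String) (backward : String) : String :=
  String.ofList (connect_urls_core forward.toList backward.toList)

-- ===== PORT B =====
-- phase 1 of B: the while loop counting and consuming leading '../' levels
def pvStripLevels (backward : List Char) : Nat × List Char :=
  if h : PySem.Chars.startswith backward ['.', '.', '/'] then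
    let p := pvStripLevels (PySem.Chars.slice backward (some 3) none)
    (p.1 + 1, p.2)
  else
    (0, backward)
termination_by backward.length
decreasing_by
  have h3 : 3 ≤ backward.length := by
    rw [PySem.Chars.startswith_iff] at h
    simpa using h.length_le
  simp only [PySem.Chars.slice_eq_listSlice]
  rw [show ((3 : Int)) = ((3 : Nat) : Int) by norm_num, PySem.List.slice_from_natCast]
  simp; omega

-- one iteration of B's for-loop body
def pvTrimLevel (forward : List Char) : List Char :=
  let f1 := if PySem.Chars.endswith forward ['/'] then
              PySem.Chars.slice forward none (some (-1)) else forward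
  PySem.Chars.slice f1 none (some (PySem.Chars.rfind f1 ['/']))

-- phase 2 of B: 'for _ in range(levels)'
def pvTrim : List Char → Nat → List Char
  | f, 0 => f
  | f, n + 1 => pvTrim (pvTrimLevel f) n

def connect_urls_alt (forward : String) (backward : String) : String :=
  let p := pvStripLevels backward.toList
  let f := pvTrim forward.toList p.1
  if PySem.Chars.startswith p.2 ['.', '/'] then
    String.ofList (f ++ PySem.Chars.replace p.2 ['.', '/'] [])
  else
    String.ofList (f ++ '/' :: p.2)

-- ===== PRECONDITION & SPEC =====
def Spec_connect_urls (forward : String) (backward : String) (out : String) : Prop := out = connect_urls_alt forward backward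
instance (forward : String) (backward : String) (out : String) : Decidable (Spec_connect_urls forward backward out) := by unfold Spec_connect_urls; infer_instance

-- ===== CLAIM (what is proved, stated in full; the proofs are below) =====
def Claim_equal_connect_urls : Prop := ∀ (forward : String) (backward : String), Dom_connect_urls forward backward → Spec_connect_urls forward backward (connect_urls forward backward)

-- ===== LEMMAS AND PROOFS =====

-- a string starting with '../' does not start with './'
lemma pv_not_dotslash {b : List Char} (h : PySem.Chars.startswith b ['.', '.', '/'] = true) :
    PySem.Chars.startswith b ['.', '/'] = false := by
  rw [PySem.Chars.startswith_iff] at h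
  obtain ⟨t, rfl⟩ := h
  rw [← Bool.not_eq_true, PySem.Chars.startswith_iff]
  rintro ⟨u, hu⟩
  simp at hu

lemma pv_core_eq (backward forward : List Char) :
    connect_urls_core forward backward =
      (if PySem.Chars.startswith (pvStripLevels backward).2 ['.', '/'] then
        pvTrim forward (pvStripLevels backward).1 ++
          PySem.Chars.replace (pvStripLevels backward).2 ['.', '/'] []
      else
        pvTrim forward (pvStripLevels backward).1 ++ '/' :: (pvStripLevels backward).2) := by
  fun_induction connect_urls_core forward backward with
  | case1 f b hdot =>
      have hnd : PySem.Chars.startswith b ['.', '.', '/'] = false := by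
        by_contra hc
        have := pv_not_dotslash (Bool.of_not_eq_false hc)
        simp [this] at hdot
      rw [pvStripLevels, dif_neg (by simp [hnd])]
      simp [hdot, pvTrim]
  | case2 f b hdot hdd f1 f2 ih =>
      rw [pvStripLevels, dif_pos hdd]
      simpa only [pvTrim, pvTrimLevel, f1, f2] using ih
  | case3 f b hdot hdd =>
      rw [pvStripLevels, dif_neg hdd]
      simp [hdot, pvTrim]

-- ===== VERDICT (by name: the statement is the Claim_ definition above) =====
theorem connect_urls_spec : Claim_equal_connect_urls := by
  intro forward backward _
  unfold Spec_connect_urls connect_urls connect_urls_alt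
  rw [pv_core_eq]
  split <;> simp_all
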